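-- pv_equiv track=rewrite | github.com/1511878618/ppp_prediction | ppp_prediction/plot/venn.py | get_shared
-- ===== SOURCE A (Python) =====
-- from itertools import combinations
--
-- def get_shared(sets):
--     IDs = sets.keys()
--     combs = sum([list(map(list, combinations(IDs, i))) for i in range(1, len(IDs) + 1)], [])
--
--     shared = {}
--     for comb in combs:
--         ID = ' and '.join(comb)
--         if len(comb) == 1:
--             shared.update({ID: sets[comb[0]]})
--         else:
--             setlist = [sets[c] for c in comb]
--             u = set.intersection(*setlist)
--             shared.update({ID: u})
--     return shared
-- ===== SOURCE B (Python) =====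
-- def get_shared(sets):
--     # Return value only; builds the same dict as A but reuses each parent
--     # subset's intersection instead of intersecting from scratch per subset.
--     items = list(sets.items())
--
--     def rec(pairs, names, inter, buckets):
--         # pairs: remaining items; names/inter: chosen prefix and its intersection (None = empty prefix)
--         if not pairs:
--             return buckets
--         (k, v), rest = pairs[0], pairs[1:]
--         cur = v if inter is None else inter & v
--         nm = names + [k]
--         buckets.setdefault(len(nm), []).append((' and '.join(nm), cur))
--         buckets = rec(rest, nm, cur, buckets)
--         return rec(rest, names, inter, buckets)
--
--     buckets = rec(items, [], None, {})
--
--     shared = {}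
--     for size in range(1, len(items) + 1):
--         for ID, u in buckets.get(size, []):
--             shared[ID] = u
--     return shared
-- ===== Notes on version B (the rewrite author's own statement) =====
-- stated objective: faster
-- what changed: Replaces per-subset from-scratch multi-set intersection over itertools.combinations of every size with a DFS over suffixes that reuses each parent subset's stored intersection (one binary '&' per subset), bucketing entries by subset size to reproduce A's output order.
import Mathlib
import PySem

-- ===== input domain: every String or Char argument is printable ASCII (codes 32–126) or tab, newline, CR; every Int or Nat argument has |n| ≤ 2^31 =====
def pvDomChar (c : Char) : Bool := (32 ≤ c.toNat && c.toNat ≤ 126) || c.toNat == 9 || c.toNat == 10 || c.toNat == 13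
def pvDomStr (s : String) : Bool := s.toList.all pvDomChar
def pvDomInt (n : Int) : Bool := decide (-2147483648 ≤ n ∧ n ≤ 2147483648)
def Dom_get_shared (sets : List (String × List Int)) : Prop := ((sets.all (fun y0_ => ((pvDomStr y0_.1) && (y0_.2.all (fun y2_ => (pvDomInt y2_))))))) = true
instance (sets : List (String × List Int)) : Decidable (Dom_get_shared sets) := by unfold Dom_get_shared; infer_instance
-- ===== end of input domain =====

-- B replaces "itertools.combinations of every size + from-scratch multi-set intersection per
-- subset" by a DFS over suffixes that reuses each parent subset's stored intersection (one
-- binary intersection per subset), bucketing entries by size to keep A's output order.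
-- The equivalence is about the RETURN value only (neither program mutates its argument).

-- ===== PORT A =====
-- itertools.combinations(pool, r), transliterated (lexicographic order of indices)
def combinationsA : List String → Nat → List (List String)
  | _, 0 => [[]]
  | [], _ + 1 => []
  | x :: xs, r + 1 => ((combinationsA xs r).map (fun c => x :: c)) ++ combinationsA xs (r + 1)

-- set.intersection(*setlist): s0 & s1 & … (left fold; [] unreachable — comb is nonempty)
def interAll : List (List Int) → List Int
  | [] => []
  | s :: rest => rest.foldl (fun a b => PySem.Set.inter a b) s

def get_shared (sets : List (String × List Int)) : List (String × List Int) :=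
  let d := PySem.Dict.mk sets
  let IDs := d.keys
  -- sum([list(map(list, combinations(IDs, i))) for i in range(1, len(IDs) + 1)], [])
  let combs := (List.range IDs.length).flatMap (fun i => combinationsA IDs (i + 1))
  let shared := combs.foldl (fun sh comb =>
    let ID := PySem.Str.join " and " comb
    if comb.length = 1 then
      -- sets[comb[0]]: comb is nonempty and its keys come from the dict, so the defaults are unreachable
      sh.insert ID (d.getD (comb.headD "") [])
    else
      let setlist := comb.map (fun c => d.getD c [])
      let u := interAll setlist
      sh.insert ID u) PySem.Dict.empty
  shared.items

-- ===== PORT B =====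
-- rec(pairs, names, inter, buckets) from Source B: the enumerate-loop body handles pairs[0]
-- (first recursive call = extending the chosen prefix) and continues on the rest
def recB : List (String × List Int) → List String → Option (List Int) →
    PySem.Dict Nat (List (String × List Int)) → PySem.Dict Nat (List (String × List Int))
  | [], _, _, buckets => buckets
  | (k, v) :: rest, names, inter, buckets =>
    let cur := match inter with
      | none => v
      | some s => PySem.Set.inter s v
    let nm := names ++ [k]
    -- buckets.setdefault(len(nm), []).append(entry)
    let buckets := buckets.modify nm.length []
      (fun l => l ++ [(PySem.Str.join " and " nm, cur)])
    let buckets := recB rest nm (some cur) buckets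
    recB rest names inter buckets

def get_shared_alt (sets : List (String × List Int)) : List (String × List Int) :=
  let items := sets
  let buckets := recB items [] none PySem.Dict.empty
  let shared := (List.range items.length).foldl (fun sh i =>
    (buckets.getD (i + 1) []).foldl (fun sh e => sh.insert e.1 e.2) sh) PySem.Dict.empty
  shared.items

-- ===== PRECONDITION & SPEC =====
-- Pre_ excludes association lists with duplicate keys: they do not represent a Python dict
-- (both Pythons receive a genuine dict), and the ports' first-match lookup is accidental there.
def Pre_get_shared (sets : List (String × List Int)) : Prop :=
  (sets.map Prod.fst).Nodup
instance (sets : List (String × List Int)) : Decidable (Pre_get_shared sets) := by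
  unfold Pre_get_shared; infer_instance

def pvWitness_get_shared : (List (String × List Int)) :=
  [("a", [1, 2]), ("b", [2, 3])]

def Spec_get_shared (sets : List (String × List Int)) (out : List (String × List Int)) : Prop := out = get_shared_alt sets
instance (sets : List (String × List Int)) (out : List (String × List Int)) : Decidable (Spec_get_shared sets out) := by unfold Spec_get_shared; infer_instance

-- ===== CLAIM (what is proved, stated in full; the proofs are below) =====
def Claim_equal_get_shared : Prop := ∀ (sets : List (String × List Int)), Dom_get_shared sets → Pre_get_shared sets → Spec_get_shared sets (get_shared sets)

-- ===== LEMMAS AND PROOFS =====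

-- combinations over the (key, value) pairs themselves: the common skeleton of both programs
def combP : List (String × List Int) → Nat → List (List (String × List Int))
  | _, 0 => [[]]
  | [], _ + 1 => []
  | p :: ps, r + 1 => ((combP ps r).map (fun c => p :: c)) ++ combP ps (r + 1)

-- the (ID, value) pair both programs associate to a chosen subset of pairs
def entryOf (comb : List (String × List Int)) : String × List Int :=
  (PySem.Str.join " and " (comb.map Prod.fst), interAll (comb.map Prod.snd))

def insE (sh : PySem.Dict String (List Int)) (e : String × List Int) :
    PySem.Dict String (List Int) := sh.insert e.1 e.2

-- the common entry sequence: subsets by size, each size in lexicographic order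
def seqE (sets : List (String × List Int)) : List (String × List Int) :=
  (List.range sets.length).flatMap (fun i => (combP sets (i + 1)).map entryOf)

-- DFS order of the nonempty sub-lists of ps, as produced by B's recursion
def exts : List (String × List Int) → List (List (String × List Int))
  | [] => []
  | p :: rest => ([p] :: (exts rest).map (fun c => p :: c)) ++ exts rest

-- value of a chosen subset given the running intersection of the prefix
def goInter : Option (List Int) → List (List Int) → List Int
  | none, vs => interAll vs
  | some s, vs => vs.foldl (fun a b => PySem.Set.inter a b) s

def tagE (names : List String) (inter : Option (List Int))
    (S : List (String × List Int)) : Nat × (String × List Int) :=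
  (names.length + S.length,
   (PySem.Str.join " and " (names ++ S.map Prod.fst), goInter inter (S.map Prod.snd)))

def pushE (b : PySem.Dict Nat (List (String × List Int)))
    (e : Nat × (String × List Int)) : PySem.Dict Nat (List (String × List Int)) :=
  b.modify e.1 [] (fun l => l ++ [e.2])

theorem combinationsA_eq (ps : List (String × List Int)) (r : Nat) :
    combinationsA (ps.map Prod.fst) r = (combP ps r).map (List.map Prod.fst) := by
  induction ps generalizing r with
  | nil => cases r <;> simp [combinationsA, combP]
  | cons p ps ih =>
    cases r with
    | zero => simp [combinationsA, combP]
    | succ r => simp [combinationsA, combP, ih, Function.comp]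

theorem mem_of_mem_combP {ps : List (String × List Int)} {r : Nat}
    {comb : List (String × List Int)} (h : comb ∈ combP ps r) :
    ∀ q ∈ comb, q ∈ ps := by
  induction ps generalizing r comb with
  | nil => cases r <;> simp_all [combP]
  | cons p ps ih =>
    cases r with
    | zero => simp_all [combP]
    | succ r =>
      simp only [combP, List.mem_append, List.mem_map] at h
      rcases h with ⟨c, hc, rfl⟩ | h
      · intro q hq
        rcases List.mem_cons.mp hq with rfl | hq
        · exact List.mem_cons_self
        · exact List.mem_cons_of_mem _ (ih hc q hq)
      · exact fun q hq => List.mem_cons_of_mem _ (ih h q hq)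

theorem length_of_mem_combP {ps : List (String × List Int)} {r : Nat}
    {comb : List (String × List Int)} (h : comb ∈ combP ps r) : comb.length = r := by
  induction ps generalizing r comb with
  | nil => cases r <;> simp_all [combP]
  | cons p ps ih =>
    cases r with
    | zero => simp_all [combP]
    | succ r =>
      simp only [combP, List.mem_append, List.mem_map] at h
      rcases h with ⟨c, hc, rfl⟩ | h
      · simp [ih hc]
      · exact ih h

theorem ne_nil_of_mem_exts {ps : List (String × List Int)}
    {S : List (String × List Int)} (h : S ∈ exts ps) : S ≠ [] := by
  induction ps generalizing S with
  | nil => simp [exts] at h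
  | cons p ps ih =>
    simp only [exts, List.cons_append, List.mem_cons, List.mem_append, List.mem_map] at h
    rcases h with rfl | ⟨c, _, rfl⟩ | h
    · simp
    · simp
    · exact ih h

theorem filter_exts (ps : List (String × List Int)) (r : Nat) :
    (exts ps).filter (fun S => S.length = r + 1) = combP ps (r + 1) := by
  induction ps generalizing r with
  | nil => simp [exts, combP]
  | cons p ps ih =>
    have hx : exts (p :: ps) = [p] :: ((exts ps).map (fun c => p :: c) ++ exts ps) := by
      simp [exts]
    rw [hx, List.filter_cons, List.filter_append, List.filter_map]
    cases r with
    | zero =>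
      have h1 : List.filter ((fun S => decide (S.length = 0 + 1)) ∘ fun c => p :: c)
          (exts ps) = [] := by
        rw [List.filter_eq_nil_iff]
        intro S hS h
        have hne := ne_nil_of_mem_exts hS
        cases S with
        | nil => exact hne rfl
        | cons a t => simp [Function.comp] at h
      simp [h1, ih 0, combP]
    | succ r =>
      have h2 : List.filter ((fun S => decide (S.length = r + 1 + 1)) ∘ fun c => p :: c)
          (exts ps) = combP ps (r + 1) := by
        have hc := List.filter_congr (l := exts ps)
          (p := (fun S => decide (S.length = r + 1 + 1)) ∘ fun c => p :: c)
          (q := fun S => decide (S.length = r + 1))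
          (fun S _ => by simp [Function.comp])
        rw [hc, ih r]
      simp [h2, combP]
      exact ih (r + 1)

theorem goInter_step (inter : Option (List Int)) (v : List Int) (vs : List (List Int)) :
    goInter inter (v :: vs) =
      goInter (some (match inter with | none => v | some s => PySem.Set.inter s v)) vs := by
  cases inter <;> simp [goInter, interAll]

theorem tagE_single (names : List String) (inter : Option (List Int)) (k : String)
    (v : List Int) :
    tagE names inter [(k, v)] =
      ((names ++ [k]).length,
       (PySem.Str.join " and " (names ++ [k]),
        match inter with | none => v | some s => PySem.Set.inter s v)) := by
  cases inter <;> simp [tagE, goInter, interAll]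

theorem tagE_cons (names : List String) (inter : Option (List Int)) (k : String)
    (v : List Int) :
    (tagE names inter ∘ fun c => (k, v) :: c) =
      tagE (names ++ [k])
        (some (match inter with | none => v | some s => PySem.Set.inter s v)) := by
  funext S
  simp only [Function.comp, tagE, List.map_cons, List.length_cons, List.length_append,
    List.length_nil, List.cons_append, List.append_assoc, List.nil_append,
    goInter_step, Prod.mk.injEq]
  exact ⟨by omega, trivial⟩

theorem recB_eq_foldl (ps : List (String × List Int)) (names : List String)
    (inter : Option (List Int)) (b : PySem.Dict Nat (List (String × List Int))) :
    recB ps names inter b = ((exts ps).map (tagE names inter)).foldl pushE b := by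
  induction ps generalizing names inter b with
  | nil => simp [recB, exts]
  | cons p ps ih =>
    obtain ⟨k, v⟩ := p
    simp only [recB, exts, List.cons_append, List.map_cons, List.map_append, List.map_map,
      List.foldl_cons, List.foldl_append, tagE_cons, tagE_single, pushE]
    rw [ih, ih]

theorem getD_foldl_pushE (l : List (Nat × (String × List Int)))
    (b : PySem.Dict Nat (List (String × List Int))) (s : Nat) :
    (l.foldl pushE b).getD s [] =
      b.getD s [] ++ (l.filter (fun e => e.1 = s)).map Prod.snd := by
  induction l generalizing b with
  | nil => simp
  | cons e l ih =>
    simp only [List.foldl_cons, List.filter_cons, ih]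
    by_cases h : e.1 = s
    · simp only [h, decide_true]
      rw [show pushE b e = b.modify e.1 [] (fun l => l ++ [e.2]) from rfl]
      rw [h, PySem.Dict.getD_modify]
      simp
    · have : (decide (e.1 = s)) = false := by simp [h]
      simp only [this, Bool.false_eq_true, if_false]
      rw [show pushE b e = b.modify e.1 [] (fun l => l ++ [e.2]) from rfl]
      rw [PySem.Dict.getD_modify]
      simp [Ne.symm h]

-- B's port equals the fold of insE over the common entry sequence
theorem get_shared_alt_eq (sets : List (String × List Int)) :
    get_shared_alt sets = ((seqE sets).foldl insE PySem.Dict.empty).items := by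
  simp only [get_shared_alt, seqE]
  rw [recB_eq_foldl]
  congr 1
  have hfold : ∀ (is : List Nat) (sh : PySem.Dict String (List Int)),
      is.foldl (fun sh i =>
        (((((exts sets).map (tagE [] none)).foldl pushE PySem.Dict.empty).getD (i + 1) []).foldl
          (fun sh e => sh.insert e.1 e.2) sh)) sh =
      (is.flatMap (fun i => (combP sets (i + 1)).map entryOf)).foldl insE sh := by
    intro is
    induction is with
    | nil => intro sh; simp
    | cons i is ih =>
      intro sh
      simp only [List.foldl_cons, List.flatMap_cons, List.foldl_append, ih]
      congr 1
      rw [getD_foldl_pushE]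
      simp only [PySem.Dict.getD_empty, List.nil_append]
      have hmapfil : (((exts sets).map (tagE [] none)).filter (fun e => e.1 = i + 1)) =
          ((exts sets).filter (fun S => S.length = i + 1)).map (tagE [] none) := by
        rw [List.filter_map]
        congr 1
        apply List.filter_congr
        intro S _
        simp [Function.comp, tagE]
      rw [hmapfil, filter_exts, List.map_map]
      have : (Prod.snd ∘ tagE [] none) = entryOf := by
        funext S
        simp [Function.comp, tagE, entryOf, goInter]
      rw [this]
      rfl
  exact hfold (List.range sets.length) PySem.Dict.empty

-- A's per-subset body equals insE of the common entry, under distinct keys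
theorem bodyA_eq (sets : List (String × List Int)) (hnd : (sets.map Prod.fst).Nodup)
    {comb : List (String × List Int)} (hne : comb ≠ [])
    (hmem : ∀ q ∈ comb, q ∈ sets) (sh : PySem.Dict String (List Int)) :
    (fun sh (c : List String) =>
      let ID := PySem.Str.join " and " c
      if c.length = 1 then
        sh.insert ID ((PySem.Dict.mk sets).getD (c.headD "") [])
      else
        sh.insert ID (interAll (c.map (fun k => (PySem.Dict.mk sets).getD k []))))
        sh (comb.map Prod.fst) = insE sh (entryOf comb) := by
  have hkeys : ((PySem.Dict.mk sets).keys).Nodup := hnd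
  have hget : ∀ q ∈ comb, (PySem.Dict.mk sets).getD q.1 [] = q.2 := by
    intro q hq
    exact PySem.Dict.getD_of_mem_items _ (hmem q hq) hkeys []
  have hmaps : (comb.map Prod.fst).map (fun k => (PySem.Dict.mk sets).getD k []) =
      comb.map Prod.snd := by
    rw [List.map_map]
    apply List.map_congr_left
    intro q hq
    exact hget q hq
  simp only [insE, entryOf]
  by_cases h1 : comb.length = 1
  · obtain ⟨q, rfl⟩ : ∃ q, comb = [q] := by
      cases comb with
      | nil => simp at h1
      | cons a t => cases t with
        | nil => exact ⟨a, rfl⟩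
        | cons b t => simp at h1
    simp only [List.map_cons, List.map_nil, List.length_cons, List.length_nil, if_true]
    rw [show ([q.1].headD "") = q.1 from rfl]
    rw [hget q (by simp)]
    rfl
  · have : (comb.map Prod.fst).length ≠ 1 := by simpa using h1
    simp only [this, if_false, hmaps]

-- A's port equals the fold of insE over the common entry sequence
theorem get_shared_eq (sets : List (String × List Int))
    (hnd : (sets.map Prod.fst).Nodup) :
    get_shared sets = ((seqE sets).foldl insE PySem.Dict.empty).items := by
  have hkeys : (PySem.Dict.mk sets).keys = sets.map Prod.fst := rfl
  simp only [get_shared, seqE, hkeys, List.length_map]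
  congr 1
  have hfold : ∀ (is : List Nat) (sh : PySem.Dict String (List Int)),
      (is.flatMap (fun i => combinationsA (sets.map Prod.fst) (i + 1))).foldl
        (fun sh c =>
          let ID := PySem.Str.join " and " c
          if c.length = 1 then
            sh.insert ID ((PySem.Dict.mk sets).getD (c.headD "") [])
          else
            sh.insert ID (interAll (c.map (fun k => (PySem.Dict.mk sets).getD k [])))) sh =
      (is.flatMap (fun i => (combP sets (i + 1)).map entryOf)).foldl insE sh := by
    intro is
    induction is with
    | nil => intro sh; simp
    | cons i is ih =>
      intro sh
      simp only [List.flatMap_cons, List.foldl_append, ih]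
      congr 1
      rw [combinationsA_eq]
      have : ∀ (cs : List (List (String × List Int))) (sh : PySem.Dict String (List Int)),
          (∀ c ∈ cs, c ∈ combP sets (i + 1)) →
          (cs.map (List.map Prod.fst)).foldl
            (fun sh c =>
              let ID := PySem.Str.join " and " c
              if c.length = 1 then
                sh.insert ID ((PySem.Dict.mk sets).getD (c.headD "") [])
              else
                sh.insert ID (interAll (c.map (fun k => (PySem.Dict.mk sets).getD k [])))) sh =
          (cs.map entryOf).foldl insE sh := by
        intro cs
        induction cs with
        | nil => intro sh _; rfl
        | cons c cs ihc =>
          intro sh hcs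
          simp only [List.map_cons, List.foldl_cons]
          have hc := hcs c (by simp)
          have hne : c ≠ [] := by
            intro h
            have := length_of_mem_combP hc
            simp [h] at this
          rw [ihc _ (fun c' hc' => hcs c' (List.mem_cons_of_mem _ hc'))]
          congr 1
          exact bodyA_eq sets hnd hne (mem_of_mem_combP hc) sh
      exact this _ sh (fun c hc => hc)
  exact hfold (List.range sets.length) PySem.Dict.empty

-- ===== VERDICT (by name: the statement is the Claim_ definition above) =====
theorem get_shared_spec : Claim_equal_get_shared := by
  intro sets _ hpre
  unfold Spec_get_shared
  rw [get_shared_eq sets hpre, get_shared_alt_eq sets]
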